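-- pv_equiv track=rewrite | github.com/manavsehgal/ai-field-notes | articles/test-time-distilling-for-exploration/evidence/repo-snapshot/tllm/workflows/benchmarks/per_request_esamp_benchmark.py | _expand_requests_for_effective_n
-- ===== SOURCE A (Python) =====
-- from typing import Dict, List, Sequence, cast
--
-- def _expand_requests_for_effective_n(
--     prompts: Sequence[str],
--     sampling_n: int,
-- ) -> tuple[List[str], List[int], List[int]]:
--     """Expand (prompt, n) into n independent requests for V1 compatibility."""
--     n = max(1, int(sampling_n))
--     expanded_prompts: List[str] = []
--     prompt_indices: List[int] = []
--     sample_indices: List[int] = []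
--     for prompt_idx, prompt in enumerate(prompts):
--         for sample_idx in range(n):
--             expanded_prompts.append(prompt)
--             prompt_indices.append(int(prompt_idx))
--             sample_indices.append(int(sample_idx))
--     return expanded_prompts, prompt_indices, sample_indices
-- ===== SOURCE B (Python) =====
-- def _expand_requests_for_effective_n(prompts, sampling_n):
--     """Flat-index decomposition: one pass over k in range(len(prompts)*n),
--     recovering prompt_idx = k // n and sample_idx = k % n arithmetically."""
--     n = max(1, int(sampling_n))
--     total = len(prompts) * n
--     expanded_prompts = [prompts[k // n] for k in range(total)]
--     prompt_indices = [k // n for k in range(total)]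
--     sample_indices = [k % n for k in range(total)]
--     return expanded_prompts, prompt_indices, sample_indices
-- ===== Notes on version B (the rewrite author's own statement) =====
-- stated objective: alternative
-- what changed: Replaces the nested enumerate/range loop that appends to three accumulators with a single flat traversal of range(len(prompts)*n), deriving prompt_idx = k // n and sample_idx = k % n by index arithmetic.
import Mathlib
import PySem

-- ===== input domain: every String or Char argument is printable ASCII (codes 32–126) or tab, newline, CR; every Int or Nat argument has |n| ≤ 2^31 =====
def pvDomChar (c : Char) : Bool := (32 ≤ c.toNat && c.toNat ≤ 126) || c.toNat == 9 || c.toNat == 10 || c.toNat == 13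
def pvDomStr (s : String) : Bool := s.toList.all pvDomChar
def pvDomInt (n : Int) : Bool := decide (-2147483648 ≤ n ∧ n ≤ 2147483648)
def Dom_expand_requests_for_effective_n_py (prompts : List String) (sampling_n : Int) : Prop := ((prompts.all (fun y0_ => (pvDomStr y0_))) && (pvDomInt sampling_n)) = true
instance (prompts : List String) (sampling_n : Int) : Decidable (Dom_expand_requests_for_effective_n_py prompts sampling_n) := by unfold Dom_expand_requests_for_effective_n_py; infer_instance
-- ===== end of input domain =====

-- B replaces A's nested enumerate/range loop with one flat traversal of range(len*n),
-- recovering prompt_idx = k // n and sample_idx = k % n by index arithmetic (alternative decomposition, same cost).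


-- ===== PORT A =====
-- literal port of A: n = max(1, sampling_n); nested loop over enumerate(prompts) × range(n),
-- appending to three accumulator lists.
def expand_requests_for_effective_n_py (prompts : List String) (sampling_n : Int) : List String × List Int × List Int :=
  let n : Int := max 1 sampling_n
  (PySem.List.enumerate prompts 0).foldl
    (fun acc pp =>
      (PySem.List.pyRange 0 n 1).foldl
        (fun acc2 sample_idx => (acc2.1 ++ [pp.2], acc2.2.1 ++ [pp.1], acc2.2.2 ++ [sample_idx]))
        acc)
    ([], [], [])

-- ===== PORT B =====
-- literal port of B: three comprehensions over the flat index range(len(prompts)*n),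
-- with prompt_idx = k // n and sample_idx = k % n.
def expand_requests_for_effective_n_py_alt (prompts : List String) (sampling_n : Int) : List String × List Int × List Int :=
  let n : Int := max 1 sampling_n
  let total : Int := (prompts.length : Int) * n
  ((PySem.List.pyRange 0 total 1).map (fun k => PySem.List.pyGetD prompts (PySem.Int.floordiv k n) ""),
   (PySem.List.pyRange 0 total 1).map (fun k => PySem.Int.floordiv k n),
   (PySem.List.pyRange 0 total 1).map (fun k => PySem.Int.mod k n))

-- ===== PRECONDITION & SPEC =====
def Spec_expand_requests_for_effective_n_py (prompts : List String) (sampling_n : Int) (out : List String × List Int × List Int) : Prop := out = expand_requests_for_effective_n_py_alt prompts sampling_n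
instance (prompts : List String) (sampling_n : Int) (out : List String × List Int × List Int) : Decidable (Spec_expand_requests_for_effective_n_py prompts sampling_n out) := by unfold Spec_expand_requests_for_effective_n_py; infer_instance

-- ===== CLAIM (what is proved, stated in full; the proofs are below) =====
def Claim_equal_expand_requests_for_effective_n_py : Prop := ∀ (prompts : List String) (sampling_n : Int), Dom_expand_requests_for_effective_n_py prompts sampling_n → Spec_expand_requests_for_effective_n_py prompts sampling_n (expand_requests_for_effective_n_py prompts sampling_n)

-- ===== LEMMAS AND PROOFS =====

-- A's inner loop only appends: its effect on the accumulator in closed form.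
theorem pvInnerFold (l : List Int) (p : String) (i : Int)
    (acc : List String × List Int × List Int) :
    l.foldl (fun acc2 sample_idx => (acc2.1 ++ [p], acc2.2.1 ++ [i], acc2.2.2 ++ [sample_idx])) acc
      = (acc.1 ++ l.map (fun _ => p), acc.2.1 ++ l.map (fun _ => i), acc.2.2 ++ l) := by
  induction l generalizing acc with
  | nil => simp
  | cons x xs ih => simp [List.foldl_cons, ih]

-- main equality, by reverse induction on prompts
theorem pvMain (prompts : List String) (sampling_n : Int) :
    expand_requests_for_effective_n_py prompts sampling_n
      = expand_requests_for_effective_n_py_alt prompts sampling_n := by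
  unfold expand_requests_for_effective_n_py expand_requests_for_effective_n_py_alt
  set n : Int := max 1 sampling_n with hn
  have hn0 : 0 < n := lt_of_lt_of_le one_pos (le_max_left _ _)
  induction prompts using List.reverseRecOn with
  | nil => simp [PySem.List.pyRange_one_eq_nil]
  | append_singleton ps p ih =>
      set m : Int := (ps.length : Int) with hm
      have hm0 : 0 ≤ m := by positivity
      -- left side: fold over enumerate (ps ++ [p]) 0
      rw [PySem.List.enumerate_append, List.foldl_append]
      have hsing : PySem.List.enumerate [p] (0 + (ps.length : Int)) = [(m, p)] := by
        simp [PySem.List.enumerate_cons, PySem.List.enumerate_nil, hm]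
      rw [hsing]
      simp only [List.foldl_cons, List.foldl_nil]
      rw [ih, pvInnerFold]
      -- right side: split the flat range at m * n
      have htot : ((ps ++ [p]).length : Int) * n = m * n + n := by
        simp [hm]; ring
      rw [htot]
      have hsplit : PySem.List.pyRange 0 (m * n + n) 1
          = PySem.List.pyRange 0 (m * n) 1 ++ PySem.List.pyRange (m * n) (m * n + n) 1 :=
        PySem.List.pyRange_one_append _ _ _ (by positivity) (by omega)
      rw [hsplit]
      simp only [List.map_append, Prod.mk.injEq]
      -- arithmetic facts about the flat index
      have hfd_lt : ∀ k : Int, 0 ≤ k → k < m * n →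
          0 ≤ PySem.Int.floordiv k n ∧ PySem.Int.floordiv k n < m := by
        intro k h1 h2
        rw [PySem.Int.floordiv_eq_ediv_of_pos hn0]
        exact ⟨Int.ediv_nonneg h1 hn0.le, (Int.ediv_lt_iff_lt_mul hn0).mpr h2⟩
      have hfd_last : ∀ k : Int, m * n ≤ k → k < m * n + n → PySem.Int.floordiv k n = m := by
        intro k h1 h2
        rw [PySem.Int.floordiv_eq_iff_of_pos hn0]
        constructor <;> nlinarith
      have hget_last : PySem.List.pyGetD (ps ++ [p]) m "" = p := by
        rw [PySem.List.pyGetD_eq_getElem _ _ hm0 (by simp [hm])]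
        simp [hm]
      have hcongr1 : List.map (fun k => PySem.List.pyGetD (ps ++ [p]) (PySem.Int.floordiv k n) "")
            (PySem.List.pyRange 0 (m * n) 1)
          = List.map (fun k => PySem.List.pyGetD ps (PySem.Int.floordiv k n) "")
            (PySem.List.pyRange 0 (m * n) 1) := by
        apply List.map_congr_left
        intro k hk
        obtain ⟨h1, h2⟩ := PySem.List.mem_pyRange_one.mp hk
        obtain ⟨hi1, hi2⟩ := hfd_lt k h1 h2
        rw [PySem.List.pyGetD_eq_getElem _ _ hi1 (by simp [hm] at hi2 ⊢; omega),
            PySem.List.pyGetD_eq_getElem _ _ hi1 (by simp [hm] at hi2 ⊢; omega)]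
        rw [List.getElem_append_left (by simp [hm] at hi2 ⊢; omega)]
      have hlastrange : PySem.List.pyRange (m * n) (m * n + n) 1
          = (List.range n.toNat).map (fun k2 : Nat => m * n + (k2 : Int)) := by
        rw [PySem.List.pyRange_one]
        simp
      refine ⟨?_, ?_, ?_⟩
      · rw [hcongr1, hlastrange, List.map_map]
        congr 1
        have : PySem.List.pyRange 0 n 1 = (List.range n.toNat).map (fun k2 : Nat => (k2 : Int)) := by
          rw [PySem.List.pyRange_one]; simp
        rw [this, List.map_map]
        apply List.map_congr_left
        intro k hk
        have hk' : (k : Int) < n := by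
          have := List.mem_range.mp hk; omega
        simp only [Function.comp]
        rw [hfd_last _ (by omega) (by omega), hget_last]
      · have hcongr2 : List.map (fun k => PySem.Int.floordiv k n)
              (PySem.List.pyRange (m * n) (m * n + n) 1)
            = List.map (fun _ => m) (PySem.List.pyRange 0 n 1) := by
          rw [hlastrange, List.map_map]
          have : PySem.List.pyRange 0 n 1 = (List.range n.toNat).map (fun k2 : Nat => (k2 : Int)) := by
            rw [PySem.List.pyRange_one]; simp
          rw [this, List.map_map]
          apply List.map_congr_left
          intro k hk
          have hk' : (k : Int) < n := by
            have := List.mem_range.mp hk; omega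
          simp only [Function.comp]
          exact hfd_last _ (by omega) (by omega)
        rw [hcongr2]
      · have hcongr3 : List.map (fun k => PySem.Int.mod k n)
              (PySem.List.pyRange (m * n) (m * n + n) 1)
            = PySem.List.pyRange 0 n 1 := by
          rw [hlastrange, List.map_map]
          have h0 : PySem.List.pyRange 0 n 1 = (List.range n.toNat).map (fun k2 : Nat => (k2 : Int)) := by
            rw [PySem.List.pyRange_one]; simp
          rw [h0]
          apply List.map_congr_left
          intro k hk
          have hk' : (k : Int) < n := by
            have := List.mem_range.mp hk; omega
          simp only [Function.comp]
          rw [PySem.Int.mod_eq_emod_of_pos hn0]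
          have : m * n + (k : Int) = (k : Int) + n * m := by ring
          rw [this, Int.add_mul_emod_self_left, Int.emod_eq_of_lt (by positivity) hk']
        rw [hcongr3]
-- ===== VERDICT (by name: the statement is the Claim_ definition above) =====
theorem expand_requests_for_effective_n_py_spec : Claim_equal_expand_requests_for_effective_n_py := by
  intro prompts sampling_n _
  unfold Spec_expand_requests_for_effective_n_py
  exact pvMain prompts sampling_n
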